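-- pv_equiv track=rewrite | github.com/jeplb/mahoraga-codec | codec/mahoraga_py/peg.py | adj_to_csr
-- ===== SOURCE A (Python) =====
-- from typing import List, Tuple
--
-- def adj_to_csr(check_to_var: List[List[int]], _n: int) -> Tuple[List[int], List[int], int]:
--     """convert check-to-var adjacency to scipy-style CSR: (indptr, indices, m)."""
--     m = len(check_to_var)
--     indptr: List[int] = [0] * (m + 1)
--     indices: List[int] = []
--     for c, vars_ in enumerate(check_to_var):
--         indices.extend(vars_)
--         indptr[c + 1] = len(indices)
--     return indptr, indices, m
-- ===== SOURCE B (Python) =====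
-- from typing import List, Tuple
--
-- def adj_to_csr(check_to_var: List[List[int]], _n: int) -> Tuple[List[int], List[int], int]:
--     """convert check-to-var adjacency to scipy-style CSR: (indptr, indices, m)."""
--     def go(rows: List[List[int]]) -> Tuple[List[int], List[int]]:
--         # divide and conquer: CSR of each half, then shift the right indptr by
--         # the left half's edge count (its indptr's last entry) and concatenate.
--         if not rows:
--             return [0], []
--         if len(rows) == 1:
--             return [0, len(rows[0])], list(rows[0])
--         mid = len(rows) // 2
--         lp, li = go(rows[:mid])
--         rp, ri = go(rows[mid:])
--         off = lp[-1]
--         return lp + [p + off for p in rp[1:]], li + ri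
--     indptr, indices = go(check_to_var)
--     return indptr, indices, len(check_to_var)
-- ===== Notes on version B (the rewrite author's own statement) =====
-- stated objective: alternative
-- what changed: Replaces A's single left-to-right loop that extends indices and records its running length into a preallocated indptr by a recursive divide-and-conquer: the CSR of each half is computed independently and the two are merged by offsetting the right half's indptr by the left half's edge count.
import Mathlib
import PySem

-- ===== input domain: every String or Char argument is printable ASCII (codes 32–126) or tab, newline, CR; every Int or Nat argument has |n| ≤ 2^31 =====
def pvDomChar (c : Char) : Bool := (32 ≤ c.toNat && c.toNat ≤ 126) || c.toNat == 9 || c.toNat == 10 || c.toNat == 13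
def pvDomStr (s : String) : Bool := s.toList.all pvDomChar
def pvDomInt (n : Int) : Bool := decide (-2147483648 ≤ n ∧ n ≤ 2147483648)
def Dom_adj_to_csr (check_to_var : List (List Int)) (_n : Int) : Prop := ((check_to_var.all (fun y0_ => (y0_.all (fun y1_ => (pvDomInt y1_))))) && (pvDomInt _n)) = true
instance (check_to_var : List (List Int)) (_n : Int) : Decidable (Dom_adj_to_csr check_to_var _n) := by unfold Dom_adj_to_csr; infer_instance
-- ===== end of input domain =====

-- B replaces A's single interleaved extend-and-record loop by a divide-and-conquer:
-- CSR of each half computed recursively, then merged by offsetting the right indptr;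
-- objective: alternative algorithm (same result, no speed claim).

-- ===== PORT A =====
def adj_to_csr (check_to_var : List (List Int)) (_n : Int) : List Int × List Int × Int :=
  let m := check_to_var.length
  let indptr : List Int := List.replicate (m + 1) 0
  let indices : List Int := []
  let res := (PySem.List.enumerate check_to_var 0).foldl
    (fun (st : List Int × List Int) cv =>
      let indices := st.2 ++ cv.2
      (PySem.List.pySetD st.1 (cv.1 + 1) (indices.length : Int), indices))
    (indptr, indices)
  (res.1, res.2, (m : Int))

-- ===== PORT B =====
-- helper 'go' of Source B: rows[:mid] / rows[mid:] are take/drop; lp[-1] (lp never empty) is pyGetD _ (-1)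
def adj_to_csr_go : List (List Int) → List Int × List Int
  | [] => ([0], [])
  | [r] => ([0, (r.length : Int)], r)
  | x :: y :: t =>
      let mid := (x :: y :: t).length / 2
      let l := adj_to_csr_go ((x :: y :: t).take mid)
      let r := adj_to_csr_go ((x :: y :: t).drop mid)
      let off := PySem.List.pyGetD l.1 (-1) 0
      (l.1 ++ (r.1.drop 1).map (fun p => p + off), l.2 ++ r.2)
termination_by rows => rows.length
decreasing_by
  · simp [List.length_take]; omega
  · simp [List.length_drop]; omega

def adj_to_csr_alt (check_to_var : List (List Int)) (_n : Int) : List Int × List Int × Int :=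
  let res := adj_to_csr_go check_to_var
  (res.1, res.2, (check_to_var.length : Int))

-- ===== PRECONDITION & SPEC =====
def Spec_adj_to_csr (check_to_var : List (List Int)) (_n : Int) (out : List Int × List Int × Int) : Prop := out = adj_to_csr_alt check_to_var _n
instance (check_to_var : List (List Int)) (_n : Int) (out : List Int × List Int × Int) : Decidable (Spec_adj_to_csr check_to_var _n out) := by unfold Spec_adj_to_csr; infer_instance

-- ===== CLAIM (what is proved, stated in full; the proofs are below) =====
def Claim_equal_adj_to_csr : Prop := ∀ (check_to_var : List (List Int)) (_n : Int), Dom_adj_to_csr check_to_var _n → Spec_adj_to_csr check_to_var _n (adj_to_csr check_to_var _n)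

-- ===== LEMMAS AND PROOFS =====

lemma scanl_head_drop {α β : Type} (f : α → β → α) (b : α) (l : List β) :
    b :: (List.scanl f b l).drop 1 = List.scanl f b l := by
  cases l <;> simp

lemma scanl_add_shift (l : List Int) : ∀ b : Int,
    List.scanl (fun a c => a + c) b l = (List.scanl (fun a c => a + c) 0 l).map (· + b) := by
  induction l with
  | nil => intro b; simp
  | cons c t ih =>
      intro b
      simp only [List.scanl_cons, List.map_cons, zero_add]
      rw [ih (b + c), ih c]
      simp [add_comm, add_left_comm]

lemma scanl_add_append (l1 l2 : List Int) : ∀ b : Int,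
    List.scanl (fun a c => a + c) b (l1 ++ l2)
      = List.scanl (fun a c => a + c) b l1
        ++ (List.scanl (fun a c => a + c) (List.foldl (fun a c => a + c) b l1) l2).drop 1 := by
  induction l1 with
  | nil =>
      intro b
      simp only [List.nil_append, List.scanl_nil, List.foldl_nil, List.singleton_append]
      exact (scanl_head_drop _ _ _).symm
  | cons c t ih =>
      intro b
      simp only [List.cons_append, List.scanl_cons, List.foldl_cons, List.cons_append]
      rw [ih (b + c)]

lemma getLast_scanl_add (l : List Int) : ∀ (b : Int) h,
    (List.scanl (fun a c => a + c) b l).getLast h = List.foldl (fun a c => a + c) b l := by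
  induction l with
  | nil => intro b h; simp
  | cons c t ih =>
      intro b h
      simp only [List.scanl_cons, List.foldl_cons]
      rw [List.getLast_cons (by simp)]
      exact ih (b + c) _

lemma adj_to_csr_go_eq (rows : List (List Int)) :
    adj_to_csr_go rows
      = (List.scanl (fun a c => a + c) 0 (rows.map (fun r => (r.length : Int))),
         rows.flatMap id) := by
  fun_induction adj_to_csr_go rows with
  | case1 => simp
  | case2 r => simp
  | case3 x y t mid l r off ih2 ih1 =>
      have htd := List.take_append_drop mid (x :: y :: t)
      rw [← htd]
      simp only [l, r, off, ih2, ih1]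
      have hne : List.scanl (fun a c => a + c) 0
          (((x :: y :: t).take mid).map (fun r => (r.length : Int))) ≠ [] := by
        cases ((x :: y :: t).take mid).map (fun r => (r.length : Int)) <;> simp
      have hoff : PySem.List.pyGetD (List.scanl (fun a c => a + c) 0
            (((x :: y :: t).take mid).map (fun r => (r.length : Int)))) (-1) 0
          = List.foldl (fun a c => a + c) 0
            (((x :: y :: t).take mid).map (fun r => (r.length : Int))) := by
        rw [PySem.List.pyGetD_neg_one _ _ hne]
        exact getLast_scanl_add _ _ _
      rw [hoff, List.map_append, List.flatMap_append, scanl_add_append,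
        scanl_add_shift _ (List.foldl (fun a c => a + c) 0 _), ← List.map_drop]

lemma csr_fold_char (l : List (List Int)) : ∀ (q acc : List Int), q ≠ [] →
    (PySem.List.enumerate l ((q.length : Int) - 1)).foldl
      (fun (st : List Int × List Int) cv =>
        let indices := st.2 ++ cv.2
        (PySem.List.pySetD st.1 (cv.1 + 1) (indices.length : Int), indices))
      (q ++ List.replicate l.length 0, acc)
    = (q ++ (List.scanl (fun a b => a + b) (acc.length : Int)
              (l.map (fun sub => (sub.length : Int)))).drop 1,
       acc ++ l.flatMap id) := by
  induction l with
  | nil => intro q acc hq; simp [PySem.List.enumerate]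
  | cons x xs ih =>
      intro q acc hq
      have hql : 1 ≤ q.length := by
        cases q with
        | nil => exact absurd rfl hq
        | cons a as => simp
      rw [PySem.List.enumerate_cons]
      simp only [List.foldl_cons]
      have hidx : ((q.length : Int) - 1) + 1 = ((q.length : Nat) : Int) := by omega
      have hset : PySem.List.pySetD (q ++ List.replicate (x :: xs).length 0)
          (((q.length : Int) - 1) + 1) ((acc ++ x).length : Int)
          = (q ++ [((acc ++ x).length : Int)]) ++ List.replicate xs.length 0 := by
        rw [hidx, PySem.List.pySetD_natCast]
        rw [List.set_append_right _ _ (Nat.le_refl _)]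
        simp [List.replicate_succ]
      simp only [hset]
      have hstart : ((q.length : Int) - 1) + 1 = (((q ++ [((acc ++ x).length : Int)]).length : Int)) - 1 := by
        simp
      rw [hstart, ih (q ++ [((acc ++ x).length : Int)]) (acc ++ x) (by simp)]
      have hlen : (((acc ++ x).length : Nat) : Int) = (acc.length : Int) + (x.length : Int) := by
        simp
      simp only [List.map_cons, List.scanl_cons, List.flatMap_cons,
        List.append_assoc, hlen, id]
      simp only [List.drop_succ_cons, List.drop_zero, List.singleton_append, scanl_head_drop]

-- ===== VERDICT (by name: the statement is the Claim_ definition above) =====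
theorem adj_to_csr_spec : Claim_equal_adj_to_csr := by
  intro check_to_var _n _hdom
  unfold Spec_adj_to_csr adj_to_csr adj_to_csr_alt
  have h0 : List.replicate (check_to_var.length + 1) (0 : Int)
      = [0] ++ List.replicate check_to_var.length 0 := by
    simp [List.replicate_succ]
  have key := csr_fold_char check_to_var [0] [] (by simp)
  simp only [List.length_cons, List.length_nil, List.nil_append, Nat.cast_one, Nat.cast_zero,
    sub_self, zero_add] at key
  dsimp only
  rw [h0, key, adj_to_csr_go_eq]
  simp only [List.singleton_append]
  rw [scanl_head_drop]
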